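-- pv_equiv track=rewrite | github.com/Jakub-Woszczek/Algorithms-and-Data-Structures-AGH-CS-Course- | Egzaminy/2019_2020/Egz 3/Zad 2/1. Endavour.py | tower_2
-- ===== SOURCE A (Python) =====
-- def tower_2(A):
--     n = len(A)
--
--     # Sortujemy klocki po pierwszym elemencie rosnąco, a jeśli te są równe, po drugim malejąco.
--     A.sort(key=lambda x: (x[0], -x[1]))
--
--     # Tablica do przechowywania wyników (memoizacja)
--     memo = [-1] * n
--
--     # Funkcja rekurencyjna do znajdowania maksymalnej wysokości wieży, zaczynając od klocka `i`
--     def rec(i):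
--         # Jeśli wynik dla `i` został już policzony, zwróć go
--         if memo[i] != -1:
--             return memo[i]
--
--         max_height = 1  # Zawsze możemy użyć przynajmniej jeden klocek (sam `i`)
--
--         # Sprawdź wszystkie wcześniejsze klocki
--         for j in range(i):
--             if A[j][0] <= A[i][0] and A[j][1] >= A[i][1]:  # Jeśli klocek j może być pod klockiem i
--                 max_height = max(max_height, 1 + rec(j))
--
--         # Zapisz wynik dla `i` w tablicy memo
--         memo[i] = max_height
--         return max_height
--
--     # Znajdź maksymalną wysokość wieży, biorąc pod uwagę każdy klocek jako potencjalny ostatni klocek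
--     max_tower = 0
--     for i in range(n):
--         max_tower = max(max_tower, rec(i))
--
--     return max_tower
-- ===== SOURCE B (Python) =====
-- def tower_2(A):
--     # Same in-place sort as the original (callers observe the same mutation).
--     A.sort(key=lambda x: (x[0], -x[1]))
--     # After sorting, a block can go under any later block iff its second coordinate
--     # is >= the later one's, so the answer is the length of the longest
--     # non-increasing subsequence of the second coordinates: patience sorting.
--     # tails[k] = largest possible last element of such a subsequence of length k+1.
--     tails = []
--     for _, y in A:
--         lo, hi = 0, len(tails)
--         while lo < hi:
--             mid = (lo + hi) // 2
--             if tails[mid] < y: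
--                 hi = mid
--             else:
--                 lo = mid + 1
--         if lo == len(tails):
--             tails.append(y)
--         else:
--             tails[lo] = y
--     return len(tails)
-- ===== Notes on version B (the rewrite author's own statement) =====
-- stated objective: faster
-- what changed: Replaced the O(n^2) memoized-recursion DP over all earlier blocks by patience sorting: after the same sort the answer is the longest non-increasing subsequence of the second coordinates, maintained with a binary-searched tails array.
import Mathlib
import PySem

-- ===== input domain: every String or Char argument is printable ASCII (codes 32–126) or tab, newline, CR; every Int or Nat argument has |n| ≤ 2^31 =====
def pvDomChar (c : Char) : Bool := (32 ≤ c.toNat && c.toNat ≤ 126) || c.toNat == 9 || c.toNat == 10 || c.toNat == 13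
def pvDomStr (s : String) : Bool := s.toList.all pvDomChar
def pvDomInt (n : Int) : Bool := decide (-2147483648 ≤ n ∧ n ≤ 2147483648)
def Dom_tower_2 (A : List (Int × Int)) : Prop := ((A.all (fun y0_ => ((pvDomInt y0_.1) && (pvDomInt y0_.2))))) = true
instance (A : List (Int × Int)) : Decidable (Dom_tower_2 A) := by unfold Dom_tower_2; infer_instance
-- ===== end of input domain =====

-- B replaces A's O(n^2) memoized DP by patience sorting (longest non-increasing
-- subsequence of the second coordinates after the same sort); both Pythons sort
-- the argument in place, the equivalence proved here is about the return value.

-- ===== PORT A =====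
def tower_2 (A : List (Int × Int)) : Int :=
  let n := A.length
  let As := PySem.List.sorted2 A (fun x => x.1) (fun x => -x.2)
  let res := (List.range n).foldl
    (fun (st : List Int × Int) (i : Nat) =>
      let memo := st.1
      let h :=
        if memo.getD i (-1) ≠ -1 then memo.getD i (-1)
        else
          (List.range i).foldl
            (fun mh (j : Nat) =>
              if (As.getD j (0, 0)).1 ≤ (As.getD i (0, 0)).1 ∧
                  (As.getD j (0, 0)).2 ≥ (As.getD i (0, 0)).2
              then max mh (1 + memo.getD j (-1)) else mh) 1
      (memo.set i h, max st.2 h))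
    (List.replicate n (-1), 0)
  res.2

-- ===== PORT B =====
-- the hand-written binary search of Source B: leftmost index in tails[lo:hi] holding a value < y
def pvBisect (tails : List Int) (y : Int) (lo hi : Nat) : Nat :=
  if _h : lo < hi then
    let mid := (lo + hi) / 2
    if tails.getD mid 0 < y then pvBisect tails y lo mid
    else pvBisect tails y (mid + 1) hi
  else lo
termination_by hi - lo
decreasing_by all_goals omega

def bStep (tails : List Int) (p : Int × Int) : List Int :=
  let lo := pvBisect tails p.2 0 tails.length
  if lo = tails.length then tails ++ [p.2] else tails.set lo p.2

def tower_2_alt (A : List (Int × Int)) : Int :=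
  let As := PySem.List.sorted2 A (fun x => x.1) (fun x => -x.2)
  let tails := As.foldl bStep []
  (tails.length : Int)

-- ===== PRECONDITION & SPEC =====
def Spec_tower_2 (A : List (Int × Int)) (out : Int) : Prop := out = tower_2_alt A
instance (A : List (Int × Int)) (out : Int) : Decidable (Spec_tower_2 A out) := by unfold Spec_tower_2; infer_instance

-- ===== CLAIM (what is proved, stated in full; the proofs are below) =====
def Claim_equal_tower_2 : Prop := ∀ (A : List (Int × Int)), Dom_tower_2 A → Spec_tower_2 A (tower_2 A)

-- ===== LEMMAS AND PROOFS =====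

-- the DP of A, expressed as a left fold over the sorted list:
-- acc holds (block, height of the tallest tower ending at that block)
def dpStep (acc : List ((Int × Int) × Int)) (p : Int × Int) : List ((Int × Int) × Int) :=
  acc ++ [(p, 1 + acc.foldl (fun m q => if q.1.1 ≤ p.1 ∧ q.1.2 ≥ p.2 then max m q.2 else m) 0)]

def dpPairs (S : List (Int × Int)) : List ((Int × Int) × Int) := S.foldl dpStep []

def tailsOf (S : List (Int × Int)) : List Int := S.foldl bStep []

-- generic fold lemmas
theorem le_foldl_ifmax {α : Type} (L : List α) (c : α → Prop) [DecidablePred c]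
    (f : α → Int) (init : Int) :
    init ≤ L.foldl (fun m q => if c q then max m (f q) else m) init := by
  induction L generalizing init with
  | nil => simp
  | cons a t ih =>
    simp only [List.foldl_cons]
    split
    · exact le_trans (le_max_left _ _) (ih _)
    · exact ih _

theorem foldl_ifmax_ge_elem {α : Type} (L : List α) (c : α → Prop) [DecidablePred c]
    (f : α → Int) (init : Int) {q : α} (hq : q ∈ L) (hc : c q) :
    f q ≤ L.foldl (fun m q => if c q then max m (f q) else m) init := by
  induction L generalizing init with
  | nil => simp at hq
  | cons a t ih =>
    simp only [List.foldl_cons]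
    rcases List.mem_cons.1 hq with rfl | hq'
    · rw [if_pos hc]
      exact le_trans (le_max_right _ _) (le_foldl_ifmax t c f _)
    · exact ih _ hq'

theorem foldl_ifmax_le {α : Type} (L : List α) (c : α → Prop) [DecidablePred c]
    (f : α → Int) (init b : Int) (hinit : init ≤ b) (h : ∀ q ∈ L, c q → f q ≤ b) :
    L.foldl (fun m q => if c q then max m (f q) else m) init ≤ b := by
  induction L generalizing init with
  | nil => simpa
  | cons a t ih =>
    simp only [List.foldl_cons]
    have h' : ∀ q ∈ t, c q → f q ≤ b := fun q hq => h q (List.mem_cons_of_mem _ hq)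
    split
    · exact ih _ (max_le hinit (h a (List.mem_cons_self) ‹_›)) h'
    · exact ih _ hinit h'

theorem foldl_ifmax_shift {α : Type} (L : List α) (c : α → Prop) [DecidablePred c]
    (f : α → Int) (k : Int) :
    L.foldl (fun m q => if c q then max m (1 + f q) else m) (1 + k)
      = 1 + L.foldl (fun m q => if c q then max m (f q) else m) k := by
  induction L generalizing k with
  | nil => simp
  | cons a t ih =>
    simp only [List.foldl_cons]
    split
    · rw [← ih (max k (f a))]; congr 1; omega
    · exact ih k

theorem le_foldl_max_snd (L : List ((Int × Int) × Int)) (init : Int) :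
    init ≤ L.foldl (fun m q => max m q.2) init := by
  induction L generalizing init with
  | nil => simp
  | cons a t ih => exact le_trans (le_max_left _ _) (ih _)

theorem foldl_max_snd_ge_elem (L : List ((Int × Int) × Int)) (init : Int)
    {q : (Int × Int) × Int} (hq : q ∈ L) :
    q.2 ≤ L.foldl (fun m q => max m q.2) init := by
  induction L generalizing init with
  | nil => simp at hq
  | cons a t ih =>
    rcases List.mem_cons.1 hq with rfl | hq'
    · exact le_trans (le_max_right _ _) (le_foldl_max_snd t _)
    · exact ih _ hq'

theorem foldl_max_snd_le (L : List ((Int × Int) × Int)) (init b : Int)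
    (hinit : init ≤ b) (h : ∀ q ∈ L, q.2 ≤ b) :
    L.foldl (fun m q => max m q.2) init ≤ b := by
  induction L generalizing init with
  | nil => simpa
  | cons a t ih =>
    exact ih _ (max_le hinit (h a List.mem_cons_self)) (fun q hq => h q (List.mem_cons_of_mem _ hq))

theorem dpPairs_append (S : List (Int × Int)) (p : Int × Int) :
    dpPairs (S ++ [p]) = dpStep (dpPairs S) p := by
  simp [dpPairs, List.foldl_append]

theorem dpPairs_map_fst (S : List (Int × Int)) : (dpPairs S).map (·.1) = S := by
  induction S using List.reverseRecOn with
  | nil => rfl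
  | append_singleton t p ih => simp [dpPairs_append, dpStep, ih]

theorem dpPairs_length (S : List (Int × Int)) : (dpPairs S).length = S.length := by
  have := congrArg List.length (dpPairs_map_fst S)
  simpa using this

theorem pairwise_foldl_insertBy {α : Type} (R : α → α → Prop) (before : α → α → Bool)
    (hbt : ∀ a b, before a b = true → R a b) (hbf : ∀ a b, before a b = false → R b a)
    (ht : ∀ a b c, R a b → R b c → R a c) :
    ∀ (xs acc : List α), acc.Pairwise R →
      (xs.foldl (fun acc x => PySem.List.insertBy before x acc) acc).Pairwise R := by
  have hins : ∀ (x : α) (ys : List α), ys.Pairwise R →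
      (PySem.List.insertBy before x ys).Pairwise R := by
    intro x ys hys
    induction ys with
    | nil => simp [PySem.List.insertBy]
    | cons a t ih =>
      rw [List.pairwise_cons] at hys
      simp only [PySem.List.insertBy]
      split
      · rename_i hb
        refine List.Pairwise.cons ?_ (List.Pairwise.cons hys.1 hys.2)
        intro z hz
        rcases List.mem_cons.1 hz with rfl | hz'
        · exact hbt _ _ hb
        · exact ht _ _ _ (hbt _ _ hb) (hys.1 z hz')
      · rename_i hb
        refine List.Pairwise.cons ?_ (ih hys.2)
        intro z hz
        rcases (PySem.List.mem_insertBy before x z t).1 hz with rfl | hz'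
        · exact hbf _ _ (Bool.not_eq_true _ ▸ (by simpa using hb))
        · exact hys.1 z hz'
  intro xs
  induction xs with
  | nil => intro acc h; simpa
  | cons x t ih => intro acc h; exact ih _ (hins x acc h)

theorem sorted2_fst_pairwise (A : List (Int × Int)) :
    (PySem.List.sorted2 A (fun x => x.1) (fun x => -x.2)).Pairwise
      (fun a b => a.1 ≤ b.1) := by
  have h := pairwise_foldl_insertBy
    (R := fun a b : Int × Int => a.1 < b.1 ∨ (a.1 = b.1 ∧ b.2 ≤ a.2))
    (before := fun a b : Int × Int =>
      decide (a.1 < b.1) || (!decide (b.1 < a.1) && decide (-a.2 < -b.2)))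
    (by intro a b hb; simp at hb; omega)
    (by intro a b hb; simp at hb; omega)
    (by intro a b c h1 h2; omega)
    A [] List.Pairwise.nil
  have : PySem.List.sorted2 A (fun x => x.1) (fun x => -x.2) =
      A.foldl (fun acc x => PySem.List.insertBy
        (fun a b : Int × Int => decide (a.1 < b.1) || (!decide (b.1 < a.1) && decide (-a.2 < -b.2)))
        x acc) [] := by
    simp [PySem.List.sorted2]
  rw [this]
  exact h.imp (by intro a b hab; omega)


theorem pvBisect_eq (T : List Int) (y : Int)
    (hanti : ∀ j k, j ≤ k → k < T.length → T.getD k 0 ≤ T.getD j 0) :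
    ∀ (d lo hi : Nat), hi - lo ≤ d →
      lo ≤ T.findIdx (fun t => decide (t < y)) →
      T.findIdx (fun t => decide (t < y)) ≤ hi → hi ≤ T.length →
      pvBisect T y lo hi = T.findIdx (fun t => decide (t < y)) := by
  intro d
  induction d with
  | zero =>
    intro lo hi hd h1 h2 h3
    rw [pvBisect]
    rw [dif_neg (by omega)]
    omega
  | succ d ih =>
    intro lo hi hd h1 h2 h3
    by_cases hlt : lo < hi
    · rw [pvBisect, dif_pos hlt]
      have hmidlt : (lo + hi) / 2 < hi := by omega
      have hmidge : lo ≤ (lo + hi) / 2 := by omega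
      have hmlen : (lo + hi) / 2 < T.length := by omega
      simp only []
      split
      · rename_i hpred
        -- T[mid] < y, so findIdx ≤ mid
        have hF : T.findIdx (fun t => decide (t < y)) ≤ (lo + hi) / 2 := by
          by_contra hcon
          push_neg at hcon
          have h5 := List.not_of_lt_findIdx hcon
          simp at h5
          rw [List.getD_eq_getElem T 0 hmlen] at hpred
          omega
        exact ih lo _ (by omega) h1 hF (by omega)
      · rename_i hpred
        push_neg at hpred
        -- T[mid] ≥ y, so mid < findIdx
        have hF : (lo + hi) / 2 < T.findIdx (fun t => decide (t < y)) := by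
          by_contra hcon
          push_neg at hcon
          have hFlen : T.findIdx (fun t => decide (t < y)) < T.length := by omega
          have h4 := List.findIdx_getElem (w := hFlen)
          simp at h4
          have h5 := hanti (T.findIdx (fun t => decide (t < y))) ((lo + hi) / 2) hcon hmlen
          rw [List.getD_eq_getElem T 0 hmlen, List.getD_eq_getElem T 0 hFlen] at h5
          rw [List.getD_eq_getElem T 0 hmlen] at hpred
          omega
        exact ih _ hi (by omega) (by omega) h2 h3
    · rw [pvBisect, dif_neg hlt]
      omega

-- the patience invariant
def PatInv (acc : List ((Int × Int) × Int)) (T : List Int) : Prop :=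
  (∀ q ∈ acc, 1 ≤ q.2 ∧ q.2 ≤ (T.length : Int)) ∧
  (∀ k, k < T.length →
    (∃ q ∈ acc, q.2 = (k : Int) + 1 ∧ q.1.2 = T.getD k 0) ∧
    (∀ q ∈ acc, q.2 = (k : Int) + 1 → q.1.2 ≤ T.getD k 0)) ∧
  (∀ j k, j ≤ k → k < T.length → T.getD k 0 ≤ T.getD j 0)

theorem tailsOf_append (t : List (Int × Int)) (p : Int × Int) :
    tailsOf (t ++ [p]) = bStep (tailsOf t) p := by
  simp [tailsOf, List.foldl_append]

theorem mem_fst_dpPairs (S : List (Int × Int)) {q : (Int × Int) × Int}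
    (hq : q ∈ dpPairs S) : q.1 ∈ S := by
  rw [← dpPairs_map_fst S]
  exact List.mem_map_of_mem hq

theorem patience_inv (S : List (Int × Int))
    (hS : S.Pairwise (fun a b => a.1 ≤ b.1)) : PatInv (dpPairs S) (tailsOf S) := by
  induction S using List.reverseRecOn with
  | nil =>
    refine ⟨by simp [dpPairs], by simp [tailsOf], by simp [tailsOf]⟩
  | append_singleton t p ih =>
    rw [List.pairwise_append] at hS
    obtain ⟨hPt, _, hcross⟩ := hS
    obtain ⟨ih1, ih2, ih3⟩ := ih hPt
    set T := tailsOf t with hT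
    set acc := dpPairs t with hacc
    set y := p.2 with hy
    set F := T.findIdx (fun v => decide (v < y)) with hF
    have hFle : F ≤ T.length := List.findIdx_le_length
    have hnotlt : ∀ k, k < F → y ≤ T.getD k 0 := by
      intro k hk
      have hklen : k < T.length := by omega
      have h5 := List.not_of_lt_findIdx (p := fun v => decide (v < y)) (xs := T)
        (show k < List.findIdx (fun v => decide (v < y)) T by omega)
      simp at h5
      rw [List.getD_eq_getElem T 0 hklen]
      exact h5
    have hFtrue : F < T.length → T.getD F 0 < y := by
      intro hFlen
      have h4 := List.findIdx_getElem (p := fun v => decide (v < y)) (xs := T) (w := hFlen)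
      rw [← List.getD_eq_getElem T 0 hFlen] at h4
      simpa using h4
    have hx : ∀ q ∈ acc, q.1.1 ≤ p.1 := by
      intro q hq
      exact hcross q.1 (mem_fst_dpPairs t hq) p (List.mem_singleton.2 rfl)
    -- the eligible maximum equals F
    have hM : acc.foldl (fun m q => if q.1.1 ≤ p.1 ∧ q.1.2 ≥ p.2 then max m q.2 else m) 0
        = (F : Int) := by
      apply le_antisymm
      · apply foldl_ifmax_le
        · exact_mod_cast Int.natCast_nonneg _
        · intro q hq hc
          obtain ⟨hq1, hq2⟩ := ih1 q hq
          set k : Nat := (q.2 - 1).toNat with hk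
          have hkq : q.2 = (k : Int) + 1 := by omega
          have hklen : k < T.length := by omega
          by_cases hkF : k < F
          · omega
          · exfalso
            have hFlen : F < T.length := by omega
            have hle1 := ih3 F k (by omega) hklen
            have hyk := hFtrue hFlen
            have hub := (ih2 k hklen).2 q hq hkq
            have : y ≤ q.1.2 := hc.2
            omega
      · rcases Nat.eq_zero_or_pos F with h0 | hposF
        · rw [h0]
          exact_mod_cast le_foldl_ifmax _ _ _ _
        · obtain ⟨q, hq, hq2, hq3⟩ := (ih2 (F - 1) (by omega)).1
          have helig : q.1.1 ≤ p.1 ∧ q.1.2 ≥ p.2 := by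
            refine ⟨hx q hq, ?_⟩
            have := hnotlt (F - 1) (by omega)
            rw [hq3, ← hy]
            omega
          have hge := foldl_ifmax_ge_elem acc
            (fun q => q.1.1 ≤ p.1 ∧ q.1.2 ≥ p.2) (fun q => q.2) 0 hq helig
          beta_reduce at hge
          have hcast : (F : Int) = q.2 := by rw [hq2]; omega
          omega
    have hbis : pvBisect T y 0 T.length = F :=
      pvBisect_eq T y ih3 T.length 0 T.length (by omega) (by omega) hFle (le_refl _)
    have hdp : dpPairs (t ++ [p]) = acc ++ [(p, (F : Int) + 1)] := by
      rw [dpPairs_append, dpStep, ← hacc, hM, Int.add_comm]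
    have htl : tailsOf (t ++ [p]) = if F = T.length then T ++ [y] else T.set F y := by
      rw [tailsOf_append, bStep, ← hT]
      simp only [← hy, hbis]
    rw [hdp, htl]
    by_cases hFeq : F = T.length
    · -- append case
      rw [if_pos hFeq]
      have hlen : (T ++ [y]).length = T.length + 1 := by simp
      have hgetlt : ∀ k, k < T.length → (T ++ [y]).getD k 0 = T.getD k 0 := by
        intro k hk; exact List.getD_append _ _ _ _ hk
      have hgetlast : (T ++ [y]).getD T.length 0 = y := by
        rw [List.getD_eq_getElem _ _ (by simp)]
        simp
      refine ⟨?_, ?_, ?_⟩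
      · intro q hq
        rcases List.mem_append.1 hq with hq' | hq'
        · have := ih1 q hq'
          rw [hlen]; push_cast; omega
        · simp at hq'
          rw [hq', hlen]
          push_cast; omega
      · intro k hk
        rw [hlen] at hk
        by_cases hkT : k < T.length
        · rw [hgetlt k hkT]
          obtain ⟨⟨q, hq, hq2, hq3⟩, hub⟩ := ih2 k hkT
          refine ⟨⟨q, List.mem_append_left _ hq, hq2, hq3⟩, ?_⟩
          intro q' hq' hq'2
          rcases List.mem_append.1 hq' with hm | hm
          · exact hub q' hm hq'2
          · simp at hm
            rw [hm] at hq'2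
            simp at hq'2
            omega
        · have hkeq : k = T.length := by omega
          subst hkeq
          refine ⟨⟨(p, (F : Int) + 1), List.mem_append_right _ (by simp), by rw [hFeq], by rw [hgetlast]⟩, ?_⟩
          intro q' hq' hq'2
          rcases List.mem_append.1 hq' with hm | hm
          · exfalso
            have := (ih1 q' hm).2
            omega
          · simp at hm
            rw [hm]
            rw [hgetlast]
      · intro j k hjk hk
        rw [hlen] at hk
        by_cases hkT : k < T.length
        · rw [hgetlt k hkT, hgetlt j (by omega)]
          exact ih3 j k hjk hkT
        · have hkeq : k = T.length := by omega
          subst hkeq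
          rw [hgetlast]
          by_cases hjT : j < T.length
          · rw [hgetlt j hjT]
            exact hnotlt j (by omega)
          · have : j = T.length := by omega
            rw [this, hgetlast]
    · -- set case
      rw [if_neg hFeq]
      have hFlt : F < T.length := by omega
      have hlen : (T.set F y).length = T.length := by simp
      have hget : ∀ k, k < T.length → (T.set F y).getD k 0 = if F = k then y else T.getD k 0 := by
        intro k hk
        rw [List.getD_eq_getElem _ _ (by simpa using hk), List.getElem_set,
          List.getD_eq_getElem T 0 hk]
      have hyF : T.getD F 0 < y := hFtrue hFlt
      refine ⟨?_, ?_, ?_⟩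
      · intro q hq
        rcases List.mem_append.1 hq with hq' | hq'
        · have := ih1 q hq'
          rw [hlen]; omega
        · simp at hq'
          rw [hq', hlen]
          push_cast; omega
      · intro k hk
        rw [hlen] at hk
        rw [hget k hk]
        by_cases hkF : F = k
        · subst hkF
          rw [if_pos rfl]
          refine ⟨⟨(p, (F : Int) + 1), List.mem_append_right _ (by simp), rfl, rfl⟩, ?_⟩
          intro q' hq' hq'2
          rcases List.mem_append.1 hq' with hm | hm
          · have := (ih2 F hk).2 q' hm hq'2
            omega
          · simp at hm
            rw [hm]
        · rw [if_neg hkF]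
          obtain ⟨⟨q, hq, hq2, hq3⟩, hub⟩ := ih2 k hk
          refine ⟨⟨q, List.mem_append_left _ hq, hq2, hq3⟩, ?_⟩
          intro q' hq' hq'2
          rcases List.mem_append.1 hq' with hm | hm
          · exact hub q' hm hq'2
          · simp at hm
            rw [hm] at hq'2
            simp at hq'2
            omega
      · intro j k hjk hk
        rw [hlen] at hk
        rw [hget k hk, hget j (by omega)]
        by_cases hkF : F = k
        · subst hkF
          rw [if_pos rfl]
          by_cases hjF : F = j
          · rw [if_pos hjF]
          · rw [if_neg hjF]
            exact hnotlt j (by omega)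
        · rw [if_neg hkF]
          by_cases hjF : F = j
          · rw [if_pos hjF]
            have := ih3 F k (by omega) hk
            omega
          · rw [if_neg hjF]
            exact ih3 j k hjk hk


theorem final_max (S : List (Int × Int)) (h : PatInv (dpPairs S) (tailsOf S)) :
    (dpPairs S).foldl (fun m q => max m q.2) 0 = ((tailsOf S).length : Int) := by
  obtain ⟨h1, h2, _h3⟩ := h
  have hle : (dpPairs S).foldl (fun m q => max m q.2) 0 ≤ ((tailsOf S).length : Int) := by
    apply foldl_max_snd_le
    · exact_mod_cast Int.natCast_nonneg _
    · exact fun q hq => (h1 q hq).2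
  have hge : ((tailsOf S).length : Int) ≤ (dpPairs S).foldl (fun m q => max m q.2) 0 := by
    rcases Nat.eq_zero_or_pos (tailsOf S).length with h0 | hpos
    · rw [h0]
      exact_mod_cast le_foldl_max_snd _ _
    · obtain ⟨q, hq, hq2, _⟩ := (h2 ((tailsOf S).length - 1) (by omega)).1
      have := foldl_max_snd_ge_elem (dpPairs S) 0 hq
      have hcast : ((tailsOf S).length : Int) = q.2 := by rw [hq2]; omega
      omega
  omega

theorem dpPairs_take (S : List (Int × Int)) (i : Nat) :
    (dpPairs S).take i = dpPairs (S.take i) := by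
  induction S using List.reverseRecOn with
  | nil => simp [dpPairs]
  | append_singleton t p ih =>
    rw [dpPairs_append]
    by_cases hi : i ≤ t.length
    · rw [dpStep, List.take_append_of_le_length
          (show i ≤ (dpPairs t).length by rw [dpPairs_length]; exact hi), ih,
        List.take_append_of_le_length hi]
    · have h1 : (dpStep (dpPairs t) p).length = t.length + 1 := by
        simp [dpStep, dpPairs_length]
      rw [← dpPairs_append]
      rw [List.take_of_length_le (by rw [dpPairs_length]; simp; omega),
        List.take_of_length_le (by simp; omega)]

theorem dpPairs_getD (S : List (Int × Int)) (i : Nat) (hi : i < S.length) :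
    (dpPairs S).getD i ((0,0),0) =
      (S.getD i (0,0), 1 + (dpPairs (S.take i)).foldl (fun m q =>
        if q.1.1 ≤ (S.getD i (0,0)).1 ∧ q.1.2 ≥ (S.getD i (0,0)).2 then max m q.2 else m) 0) := by
  have hlen : i < (dpPairs S).length := by rw [dpPairs_length]; exact hi
  have h1 : S.take (i + 1) = S.take i ++ [S.getD i (0,0)] := by
    rw [List.take_succ]
    rw [List.getElem?_eq_getElem hi, List.getD_eq_getElem S _ hi]
    rfl
  have h2 : (dpPairs S).take (i + 1) = dpPairs (S.take i) ++
      [(S.getD i (0,0), 1 + (dpPairs (S.take i)).foldl (fun m q =>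
        if q.1.1 ≤ (S.getD i (0,0)).1 ∧ q.1.2 ≥ (S.getD i (0,0)).2 then max m q.2 else m) 0)] := by
    rw [dpPairs_take, h1, dpPairs_append, dpStep]
  have h3 : (dpPairs S).getD i ((0,0),0) = ((dpPairs S).take (i+1)).getD i ((0,0),0) := by
    rw [List.getD_eq_getElem _ _ hlen, List.getD_eq_getElem _ _ (by simp [dpPairs_length]; omega)]
    rw [List.getElem_take]
  rw [h3, h2, List.getD_append_right _ _ _ _ (by rw [dpPairs_length]; simp)]
  have : i - (dpPairs (S.take i)).length = 0 := by rw [dpPairs_length, List.length_take]; omega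
  rw [this]
  rfl

theorem inner_fold_eq (S : List (Int × Int)) (memo : List Int) (pi : Int × Int)
    (i : Nat) (hi : i ≤ S.length)
    (hm : ∀ j, j < i → memo.getD j (-1) = ((dpPairs S).getD j ((0,0),0)).2) :
    (List.range i).foldl (fun mh j =>
       if (S.getD j (0,0)).1 ≤ pi.1 ∧ (S.getD j (0,0)).2 ≥ pi.2
       then max mh (1 + memo.getD j (-1)) else mh) 1
    = (dpPairs (S.take i)).foldl (fun m q =>
       if q.1.1 ≤ pi.1 ∧ q.1.2 ≥ pi.2 then max m (1 + q.2) else m) 1 := by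
  induction i with
  | zero => simp [dpPairs]
  | succ i ih =>
    have hii : i < S.length := by omega
    rw [List.range_succ, List.foldl_append, ih (by omega) (fun j hj => hm j (by omega))]
    have h1 : S.take (i + 1) = S.take i ++ [S.getD i (0,0)] := by
      rw [List.take_succ, List.getElem?_eq_getElem hii, List.getD_eq_getElem S _ hii]
      rfl
    rw [h1, dpPairs_append, dpStep, List.foldl_append]
    simp only [List.foldl_cons, List.foldl_nil]
    rw [hm i (by omega), dpPairs_getD S i hii]

def AStep (S : List (Int × Int)) (st : List Int × Int) (i : Nat) : List Int × Int :=
  let memo := st.1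
  let h :=
    if memo.getD i (-1) ≠ -1 then memo.getD i (-1)
    else
      (List.range i).foldl
        (fun mh (j : Nat) =>
          if (S.getD j (0, 0)).1 ≤ (S.getD i (0, 0)).1 ∧
              (S.getD j (0, 0)).2 ≥ (S.getD i (0, 0)).2
          then max mh (1 + memo.getD j (-1)) else mh) 1
  (memo.set i h, max st.2 h)

theorem tower_2_eq_outer (A : List (Int × Int)) :
    tower_2 A = ((List.range A.length).foldl
      (AStep (PySem.List.sorted2 A (fun x => x.1) (fun x => -x.2)))
      (List.replicate A.length (-1), 0)).2 := rfl

theorem outer_inv (S : List (Int × Int)) (n : Nat) (hn : n = S.length) :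
    ∀ i, i ≤ n →
      (List.range i).foldl (AStep S) (List.replicate n (-1), 0)
      = (((dpPairs S).take i).map (fun q : (Int × Int) × Int => q.2) ++ List.replicate (n - i) (-1),
         ((dpPairs S).take i).foldl (fun m q => max m q.2) 0) := by
  intro i
  induction i with
  | zero => simp [dpPairs]
  | succ i ih =>
    intro hi1
    rw [List.range_succ, List.foldl_append, ih (by omega)]
    simp only [List.foldl_cons, List.foldl_nil]
    have hilt : i < S.length := by omega
    have hpreflen : ((((dpPairs S).take i)).map (fun q : (Int × Int) × Int => q.2)).length = i := by
      simp [dpPairs_length]; omega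
    have hmemoi : ((((dpPairs S).take i)).map (fun q : (Int × Int) × Int => q.2) ++ List.replicate (n - i) (-1)).getD i (-1)
        = (-1 : Int) := by
      rw [List.getD_append_right _ _ _ _ (by omega), hpreflen]
      have : n - i = (n - i - 1) + 1 := by omega
      rw [this, List.replicate_succ, Nat.sub_self]
      rfl
    have hm : ∀ j, j < i →
        ((((dpPairs S).take i)).map (fun q : (Int × Int) × Int => q.2) ++ List.replicate (n - i) (-1)).getD j (-1)
          = ((dpPairs S).getD j ((0,0),0)).2 := by
      intro j hj
      rw [List.getD_append _ _ _ _ (by omega)]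
      have hjlen : j < (((dpPairs S).take i).map (fun q : (Int × Int) × Int => q.2)).length := by omega
      have hjlen2 : j < (dpPairs S).length := by rw [dpPairs_length]; omega
      rw [List.getD_eq_getElem _ _ hjlen, List.getD_eq_getElem _ _ hjlen2]
      simp [List.getElem_take]
    have hx : (dpPairs S)[i]'(by rw [dpPairs_length]; exact hilt) = (dpPairs S).getD i ((0,0),0) := by
      rw [List.getD_eq_getElem _ _ (by rw [dpPairs_length]; exact hilt)]
    have hnewpref : ((dpPairs S).take (i+1)).map (fun q : (Int × Int) × Int => q.2)
        = (((dpPairs S).take i)).map (fun q : (Int × Int) × Int => q.2) ++ [((dpPairs S).getD i ((0,0),0)).2] := by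
      rw [List.take_succ, List.getElem?_eq_getElem (by rw [dpPairs_length]; exact hilt)]
      rw [List.map_append, hx]
      rfl
    simp only [AStep]
    rw [hmemoi]
    simp only [ne_eq, not_true_eq_false, if_false]
    rw [inner_fold_eq S _ (S.getD i (0,0)) i (by omega) hm]
    have hshift : (dpPairs (S.take i)).foldl (fun m q =>
        if q.1.1 ≤ (S.getD i (0,0)).1 ∧ q.1.2 ≥ (S.getD i (0,0)).2 then max m (1 + q.2) else m) 1
        = ((dpPairs S).getD i ((0,0),0)).2 := by
      have hs := foldl_ifmax_shift (dpPairs (S.take i))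
        (fun q => q.1.1 ≤ (S.getD i (0,0)).1 ∧ q.1.2 ≥ (S.getD i (0,0)).2)
        (fun q => q.2) 0
      beta_reduce at hs
      simp only [Int.add_zero] at hs
      rw [hs, dpPairs_getD S i hilt]
    rw [hshift, Prod.mk.injEq]
    constructor
    · -- memo.set
      have h2 : n - i = (n - i - 1) + 1 := by omega
      rw [List.set_append, if_neg (by omega), hpreflen, Nat.sub_self, h2,
        List.replicate_succ, List.set_cons_zero, hnewpref,
        show n - (i+1) = n - i - 1 by omega]
      simp
    · -- running max
      rw [List.take_succ, List.getElem?_eq_getElem (by rw [dpPairs_length]; exact hilt)]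
      rw [List.foldl_append, hx]
      rfl

theorem tower_2_eq_dp (A : List (Int × Int)) :
    tower_2 A = (dpPairs (PySem.List.sorted2 A (fun x => x.1) (fun x => -x.2))).foldl
      (fun m q => max m q.2) 0 := by
  rw [tower_2_eq_outer]
  have hlen : A.length = (PySem.List.sorted2 A (fun x => x.1) (fun x => -x.2)).length :=
    (PySem.List.sorted2_perm A (fun x => x.1) (fun x => -x.2) false).length_eq.symm
  rw [outer_inv _ _ hlen A.length (le_refl _)]
  rw [List.take_of_length_le (by rw [dpPairs_length]; omega)]


-- ===== VERDICT (by name: the statement is the Claim_ definition above) =====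
theorem tower_2_spec : Claim_equal_tower_2 := by
  intro A _hdom
  show tower_2 A = tower_2_alt A
  rw [tower_2_eq_dp A]
  have h := patience_inv (PySem.List.sorted2 A (fun x => x.1) (fun x => -x.2))
    (sorted2_fst_pairwise A)
  rw [final_max _ h]
  rfl
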